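-- pv_equiv track=rewrite | github.com/jeremy-p-mann/dotfiles | .config/nvim/rplugin/python/chatbot.py | parse_chat
-- ===== SOURCE A (Python) =====
-- from typing import Dict, List
--
-- def parse_chat(buffer: List[str]):
--     speaker_lines = [
--         (i, line[3:].lower()) for i, line in enumerate(buffer) if '## ' == line[:3]
--     ]
--     ans = [
--         {'role': term[1], 'content': '\n'.join(
--             buffer[(term[0]+1):speaker_lines[i+1][0]])}
--         if i < len(speaker_lines) - 1
--         else
--         {'role': term[1], 'content': '\n'.join(buffer[(term[0]+1):])}
--         for i, term in enumerate(speaker_lines)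
--     ]
--     return ans
-- ===== SOURCE B (Python) =====
-- from typing import Dict, List
--
-- def parse_chat(buffer: List[str]):
--     # single pass: open a new segment at each '## ' marker, append other
--     # lines to the currently open segment (lines before the first marker drop)
--     segs = []  # list of (role, [content lines])
--     for line in buffer:
--         if line[:3] == '## ':
--             segs.append((line[3:].lower(), []))
--         elif segs:
--             segs[-1][1].append(line)
--     return [{'role': role, 'content': '\n'.join(lines)} for role, lines in segs]
-- ===== Notes on version B (the rewrite author's own statement) =====
-- stated objective: simpler
-- what changed: A precomputes an indexed table of marker lines and slices the buffer between consecutive marker positions (with a last-segment special case); B makes one stateful pass that opens a segment at each '## ' marker and appends other lines to the currently open segment, then joins.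
import Mathlib
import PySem

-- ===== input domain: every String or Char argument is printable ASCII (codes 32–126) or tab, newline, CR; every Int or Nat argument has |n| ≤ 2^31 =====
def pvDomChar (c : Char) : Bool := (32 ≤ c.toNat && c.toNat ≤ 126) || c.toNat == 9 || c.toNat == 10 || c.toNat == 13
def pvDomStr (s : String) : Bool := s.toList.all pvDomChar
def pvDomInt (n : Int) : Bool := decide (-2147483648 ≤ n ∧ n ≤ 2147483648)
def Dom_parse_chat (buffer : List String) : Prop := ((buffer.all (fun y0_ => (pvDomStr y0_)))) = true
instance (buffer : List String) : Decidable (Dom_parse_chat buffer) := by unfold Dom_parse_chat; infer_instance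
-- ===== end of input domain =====

-- B replaces A's precomputed marker-index table plus per-segment slicing with a
-- single stateful pass that appends each line to the currently open segment (objective: simpler).

-- ===== PORT A =====
-- the speaker_lines comprehension of A
def aMarkers (buffer : List String) : List (Int × String) :=
  (PySem.List.enumerate buffer 0).filterMap (fun p =>
    if "## " = PySem.Str.slice p.2 none (some 3)
    then some (p.1, PySem.Str.lower (PySem.Str.slice p.2 (some 3) none)) else none)

-- the ans comprehension of A (speaker_lines passed explicitly)
def aAns (buffer : List String) (speaker_lines : List (Int × String)) :
    List (List (String × String)) :=
  (PySem.List.enumerate speaker_lines 0).map (fun q =>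
    if q.1 < (speaker_lines.length : Int) - 1 then
      [("role", q.2.2), ("content", PySem.Str.join "\n"
        (PySem.List.slice buffer (some (q.2.1 + 1))
          (some (PySem.List.pyGetD speaker_lines (q.1 + 1) (0, "")).1)))]
    else
      [("role", q.2.2), ("content", PySem.Str.join "\n"
        (PySem.List.slice buffer (some (q.2.1 + 1)) none))])

def parse_chat (buffer : List String) : List (List (String × String)) :=
  aAns buffer (aMarkers buffer)

-- ===== PORT B =====
-- one step of B's for-loop over the lines
def bStep (segs : List (String × List String)) (line : String) :
    List (String × List String) :=
  if PySem.Str.slice line none (some 3) == "## " then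
    segs ++ [(PySem.Str.lower (PySem.Str.slice line (some 3) none), [])]
  else if segs.isEmpty then segs
  else segs.dropLast ++ [((segs.getLastD ("", [])).1, (segs.getLastD ("", [])).2 ++ [line])]

def parse_chat_alt (buffer : List String) : List (List (String × String)) :=
  (buffer.foldl bStep []).map
    (fun rl => [("role", rl.1), ("content", PySem.Str.join "\n" rl.2)])

-- ===== PRECONDITION & SPEC =====
def Spec_parse_chat (buffer : List String) (out : List (List (String × String))) : Prop := out = parse_chat_alt buffer
instance (buffer : List String) (out : List (List (String × String))) : Decidable (Spec_parse_chat buffer out) := by unfold Spec_parse_chat; infer_instance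

-- ===== CLAIM (what is proved, stated in full; the proofs are below) =====
def Claim_equal_parse_chat : Prop := ∀ (buffer : List String), Dom_parse_chat buffer → Spec_parse_chat buffer (parse_chat buffer)

-- ===== LEMMAS AND PROOFS =====

-- proof-side vocabulary
def isMk (l : String) : Bool := PySem.Str.slice l none (some 3) == "## "

def roleOf (l : String) : String := PySem.Str.lower (PySem.Str.slice l (some 3) none)

-- canonical segment list: role + raw content lines per marker
def segsOf : List String → List (String × List String)
  | [] => []
  | l :: rest =>
      if isMk l then (roleOf l, rest.takeWhile (fun s => !isMk s)) :: segsOf rest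
      else segsOf rest

def render (p : String × List String) : List (String × String) :=
  [("role", p.1), ("content", PySem.Str.join "\n" p.2)]

-- recursive form of A's ans comprehension
def aRun (buffer : List String) : List (Int × String) → List (List (String × String))
  | [] => []
  | [t] => [[("role", t.2), ("content", PySem.Str.join "\n"
              (PySem.List.slice buffer (some (t.1 + 1)) none))]]
  | t :: u :: ts =>
      [("role", t.2), ("content", PySem.Str.join "\n"
        (PySem.List.slice buffer (some (t.1 + 1)) (some u.1)))] :: aRun buffer (u :: ts)

-- ---- B side ----

lemma foldl_bStep_open (lines : List String) :
    ∀ (pre : List (String × List String)) (r : String) (acc : List String),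
      List.foldl bStep (pre ++ [(r, acc)]) lines =
        pre ++ (r, acc ++ lines.takeWhile (fun s => !isMk s)) :: segsOf lines := by
  induction lines with
  | nil => intro pre r acc; simp [segsOf]
  | cons l tl ih =>
      intro pre r acc
      by_cases h : isMk l = true
      · have hstep : bStep (pre ++ [(r, acc)]) l =
            (pre ++ [(r, acc)]) ++ [(roleOf l, [])] := by
          simp [bStep, isMk] at h ⊢; simp [h, roleOf]
        rw [List.foldl_cons, hstep, ih (pre ++ [(r, acc)]) (roleOf l) []]
        simp [segsOf, h, List.takeWhile]
      · have hstep : bStep (pre ++ [(r, acc)]) l = pre ++ [(r, acc ++ [l])] := by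
          simp [bStep, isMk] at h ⊢
          simp [h]
        simp only [List.foldl_cons, hstep]
        rw [ih pre r (acc ++ [l])]
        simp [segsOf, h, List.takeWhile]
  
lemma foldl_bStep_nil (lines : List String) :
    List.foldl bStep [] lines = segsOf lines := by
  induction lines with
  | nil => simp [segsOf]
  | cons l tl ih =>
      by_cases h : isMk l = true
      · have hstep : bStep [] l = [] ++ [(roleOf l, [])] := by
          simp [bStep, isMk] at h ⊢; simp [h, roleOf]
        simp only [List.foldl_cons, hstep]
        rw [foldl_bStep_open tl [] (roleOf l) []]
        simp [segsOf, h]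
      · have hstep : bStep [] l = [] := by
          simp [bStep, isMk] at h ⊢; simp [h]
        simp only [List.foldl_cons, hstep, ih]
        simp [segsOf, h]

lemma alt_eq_render (buffer : List String) :
    parse_chat_alt buffer = (segsOf buffer).map render := by
  simp [parse_chat_alt, foldl_bStep_nil, render]

-- ---- A side ----

lemma aMarkers_nil : aMarkers [] = [] := by simp [aMarkers, PySem.List.enumerate]

lemma enumerate_shift {α : Type} (xs : List α) (s : Int) :
    PySem.List.enumerate xs (s + 1) =
      (PySem.List.enumerate xs s).map (fun p => (p.1 + 1, p.2)) := by
  induction xs generalizing s with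
  | nil => simp [PySem.List.enumerate]
  | cons x xs ih =>
      rw [PySem.List.enumerate_cons, PySem.List.enumerate_cons, ih (s + 1)]
      simp

lemma aMarkers_cons (l : String) (xs : List String) :
    aMarkers (l :: xs) =
      (if isMk l then [((0 : Int), roleOf l)] else []) ++
        (aMarkers xs).map (fun p => (p.1 + 1, p.2)) := by
  unfold aMarkers
  rw [PySem.List.enumerate_cons]
  have h0 : (0 : Int) + 1 = 0 + 1 := rfl
  rw [show ((0:Int) + 1) = (0 : Int) + 1 from rfl, enumerate_shift xs 0]
  rw [List.filterMap_cons, List.filterMap_map]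
  have hfm : List.filterMap
      ((fun p : Int × String =>
          if "## " = PySem.Str.slice p.2 none (some 3)
          then some (p.1, PySem.Str.lower (PySem.Str.slice p.2 (some 3) none)) else none) ∘
        (fun p : Int × String => (p.1 + 1, p.2)))
      (PySem.List.enumerate xs 0)
      = ((PySem.List.enumerate xs 0).filterMap
          (fun p : Int × String =>
            if "## " = PySem.Str.slice p.2 none (some 3)
            then some (p.1, PySem.Str.lower (PySem.Str.slice p.2 (some 3) none)) else none)).map
          (fun p => (p.1 + 1, p.2)) := by
    rw [List.map_filterMap]
    apply List.filterMap_congr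
    intro p _
    by_cases h : "## " = PySem.Str.slice p.2 none (some 3) <;> simp [h]
  rw [hfm]
  by_cases h : isMk l = true
  · have h' : "## " = PySem.Str.slice l none (some 3) := by
      simp [isMk] at h; exact h.symm
    simp [h, h', roleOf]
  · have h' : ¬ "## " = PySem.Str.slice l none (some 3) := by
      simp [isMk] at h; exact fun hc => h hc.symm
    simp [h, h']

lemma aMarkers_nonneg (xs : List String) : ∀ p ∈ aMarkers xs, 0 ≤ p.1 := by
  induction xs with
  | nil => simp [aMarkers_nil]
  | cons l tl ih =>
      intro p hp
      rw [aMarkers_cons, List.mem_append] at hp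
      rcases hp with h | h
      · by_cases hm : isMk l = true
        · simp [hm] at h
          simp [h]
        · simp [hm] at h
      · rcases List.mem_map.1 h with ⟨q, hq, rfl⟩
        have := ih q hq
        simp
        omega

lemma aMarkers_nil_takeWhile (xs : List String) (h : aMarkers xs = []) :
    xs.takeWhile (fun s => !isMk s) = xs := by
  induction xs with
  | nil => rfl
  | cons l tl ih =>
      rw [aMarkers_cons] at h
      by_cases hm : isMk l = true
      · simp [hm] at h
      · simp [hm] at h
        simp [hm, ih h]

lemma aMarkers_nil_segsOf (xs : List String) (h : aMarkers xs = []) :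
    segsOf xs = [] := by
  induction xs with
  | nil => rfl
  | cons l tl ih =>
      rw [aMarkers_cons] at h
      by_cases hm : isMk l = true
      · simp [hm] at h
      · simp [hm] at h
        simp [segsOf, hm, ih h]

lemma aMarkers_head_takeWhile (xs : List String) (i : Int) (r : String)
    (tl : List (Int × String)) (h : aMarkers xs = (i, r) :: tl) :
    xs.takeWhile (fun s => !isMk s) = xs.take i.toNat := by
  induction xs generalizing i r tl with
  | nil => simp [aMarkers_nil] at h
  | cons l ys ih =>
      rw [aMarkers_cons] at h
      by_cases hm : isMk l = true
      · simp [hm] at h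
        obtain ⟨h1, _⟩ := h
        simp [List.takeWhile, hm, ← h1.1]
      · simp [hm] at h
        rcases List.map_eq_cons_iff.1 h with ⟨⟨j, s⟩, tl', hmk, hh, htl⟩
        have hj : (0:Int) ≤ j := aMarkers_nonneg ys _ (by rw [hmk]; exact List.mem_cons_self ..)
        have hi : i = j + 1 := by simpa using congrArg Prod.fst hh.symm
        have : i.toNat = j.toNat + 1 := by omega
        simp [List.takeWhile, hm, this, List.take_succ_cons, ih j s tl' hmk]

-- A's comprehension equals the recursive renderer
lemma aAns_eq_aRun (sl : List (Int × String)) (buffer : List String) :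
    aAns buffer sl = aRun buffer sl := by
  induction sl with
  | nil => simp [aAns, aRun, PySem.List.enumerate]
  | cons t rest ih =>
      cases rest with
      | nil =>
          simp [aAns, aRun, PySem.List.enumerate]
      | cons u ts =>
          unfold aAns
          rw [PySem.List.enumerate_cons, List.map_cons, enumerate_shift, List.map_map]
          rw [show aRun buffer (t :: u :: ts) =
            [("role", t.2), ("content", PySem.Str.join "\n"
              (PySem.List.slice buffer (some (t.1 + 1)) (some u.1)))] ::
              aRun buffer (u :: ts) from rfl]
          congr 1
          · have hc : (0:Int) < ((t :: u :: ts).length : Int) - 1 := by simp; try omega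
            have hg : PySem.List.pyGetD (t :: u :: ts) ((0:Int) + 1) (0, "") = u := by
              rw [show ((0:Int) + 1) = ((1:Nat):Int) from rfl, PySem.List.pyGetD_natCast]
              try rfl
            simp only [if_pos hc, hg]
          · rw [← ih]
            unfold aAns
            apply List.map_congr_left
            intro q hq
            rw [PySem.List.mem_enumerate_iff] at hq
            obtain ⟨k, hk, rfl⟩ := hq
            simp only [Function.comp_apply, zero_add]
            have hcond : ((k:Int) + 1 < ((t :: u :: ts).length : Int) - 1) ↔
                ((k:Int) < ((u :: ts).length : Int) - 1) := by simp; try omega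
            have hget : PySem.List.pyGetD (t :: u :: ts) ((k:Int) + 1 + 1) (0, "") =
                PySem.List.pyGetD (u :: ts) ((k:Int) + 1) (0, "") := by
              have e1 : (k:Int) + 1 + 1 = ((k + 2 : Nat) : Int) := by push_cast; ring
              have e2 : (k:Int) + 1 = ((k + 1 : Nat) : Int) := by push_cast; ring
              rw [e1, e2, PySem.List.pyGetD_natCast, PySem.List.pyGetD_natCast]
              try rfl
            by_cases hc : (k:Int) < ((u :: ts).length : Int) - 1
            · rw [if_pos (hcond.2 hc), if_pos hc, hget]
            · rw [if_neg (fun h => hc (hcond.1 h)), if_neg hc]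

-- extending the buffer on the left shifts all nonnegative marker positions by one
lemma aRun_shift (l : String) (xs : List String) :
    ∀ (sl : List (Int × String)), (∀ p ∈ sl, 0 ≤ p.1) →
      aRun (l :: xs) (sl.map (fun p => (p.1 + 1, p.2))) = aRun xs sl := by
  intro sl
  induction sl with
  | nil => intro _; rfl
  | cons t rest ih =>
      intro hnn
      have ht : 0 ≤ t.1 := hnn t (List.mem_cons_self ..)
      have hslice1 : PySem.List.slice (l :: xs) (some (t.1 + 1 + 1)) none =
          PySem.List.slice xs (some (t.1 + 1)) none := by
        have e1 : t.1 + 1 + 1 = ((t.1.toNat + 2 : Nat) : Int) := by push_cast; omega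
        have e2 : t.1 + 1 = ((t.1.toNat + 1 : Nat) : Int) := by push_cast; omega
        rw [e1, e2, PySem.List.slice_from_natCast, PySem.List.slice_from_natCast]
        rfl
      cases rest with
      | nil => simp [aRun, hslice1]
      | cons u ts =>
          have hu : 0 ≤ u.1 := hnn u (by simp)
          have hslice2 : PySem.List.slice (l :: xs) (some (t.1 + 1 + 1)) (some (u.1 + 1)) =
              PySem.List.slice xs (some (t.1 + 1)) (some u.1) := by
            have e1 : t.1 + 1 + 1 = ((t.1.toNat + 2 : Nat) : Int) := by push_cast; omega
            have e2 : u.1 + 1 = ((u.1.toNat + 1 : Nat) : Int) := by push_cast; omega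
            have e3 : t.1 + 1 = ((t.1.toNat + 1 : Nat) : Int) := by push_cast; omega
            have e4 : u.1 = ((u.1.toNat : Nat) : Int) := by omega
            rw [e1, e2, e3, e4, PySem.List.slice_natCast, PySem.List.slice_natCast]
            simp [List.drop_succ_cons]
            omega
          have htl := ih (fun p hp => hnn p (List.mem_cons_of_mem _ hp))
          simp only [List.map_cons] at htl ⊢
          simp [aRun, hslice2, htl]

lemma a_eq_render (buffer : List String) :
    parse_chat buffer = (segsOf buffer).map render := by
  unfold parse_chat
  rw [aAns_eq_aRun]
  induction buffer with
  | nil => simp [aMarkers_nil, aRun, segsOf]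
  | cons l xs ih =>
      rw [aMarkers_cons]
      by_cases hm : isMk l = true
      · simp only [if_pos hm, List.singleton_append]
        cases hxs : aMarkers xs with
        | nil =>
            simp only [List.map_nil]
            have h1 : PySem.List.slice (l :: xs) (some (1:Int)) none = xs := by
              rw [show ((1:Int)) = ((1:Nat) : Int) from rfl, PySem.List.slice_from_natCast]
              rfl
            simp [aRun, segsOf, hm, h1, aMarkers_nil_takeWhile xs hxs,
              aMarkers_nil_segsOf xs hxs, render]
        | cons t tl =>
            obtain ⟨i, r⟩ := t
            have hi : 0 ≤ i := aMarkers_nonneg xs _ (by rw [hxs]; exact List.mem_cons_self ..)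
            have hslice : PySem.List.slice (l :: xs) (some ((0:Int) + 1)) (some (i + 1)) =
                xs.take i.toNat := by
              have e1 : (0:Int) + 1 = ((1:Nat) : Int) := rfl
              have e2 : i + 1 = ((i.toNat + 1 : Nat) : Int) := by omega
              rw [e1, e2, PySem.List.slice_natCast]
              simp
            have htail : aRun (l :: xs) (((i, r) :: tl).map (fun p => (p.1 + 1, p.2))) =
                aRun xs ((i, r) :: tl) := by
              apply aRun_shift
              intro p hp
              exact aMarkers_nonneg xs p (by rw [hxs]; exact hp)
            simp only [List.map_cons, aRun, hslice]
            rw [hxs] at ih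
            have htail' : aRun (l :: xs) ((i + 1, r) :: tl.map (fun p => (p.1 + 1, p.2))) =
                aRun xs ((i, r) :: tl) := by simpa using htail
            rw [htail', ih]
            simp [segsOf, hm, render, aMarkers_head_takeWhile xs i r tl hxs]
      · simp only [if_neg hm, List.nil_append]
        rw [aRun_shift l xs (aMarkers xs) (aMarkers_nonneg xs), ih]
        simp [segsOf, hm]

-- ===== VERDICT (by name: the statement is the Claim_ definition above) =====
theorem parse_chat_spec : Claim_equal_parse_chat := by
  intro buffer _
  unfold Spec_parse_chat
  rw [a_eq_render, alt_eq_render]
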